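-- pv_equiv track=rewrite | github.com/Disc4will/informationRv | exp1/exp1.py | condisplit
-- ===== SOURCE A (Python) =====
-- def condisplit(condi):  # TODO：在文件2/3里有一个更好的试试替换
--     condiset = []
--     k = 0
--     for i in range(len(condi)):
--         if condi[i] in ['+', '|']:
--             subcondi = condi[k:i]
--             k = i
--             condiset.append(subcondi)
--     return condiset
-- ===== SOURCE B (Python) =====
-- def condisplit(condi):
--     segs = []
--     cur = []
--     for c in condi:
--         if c in '+|':
--             segs.append(''.join(cur))
--             cur = [c]
--         else:
--             cur.append(c)
--     return segs
-- ===== Notes on version B (the rewrite author's own statement) =====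
-- stated objective: alternative
-- what changed: B keeps no indices at all: instead of A's position bookkeeping (last delimiter index k plus slicing condi[k:i]), it accumulates characters into a current-segment buffer and flushes the buffer to the output whenever a delimiter is seen, so the trailing buffer after the last delimiter is naturally discarded.
import Mathlib
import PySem

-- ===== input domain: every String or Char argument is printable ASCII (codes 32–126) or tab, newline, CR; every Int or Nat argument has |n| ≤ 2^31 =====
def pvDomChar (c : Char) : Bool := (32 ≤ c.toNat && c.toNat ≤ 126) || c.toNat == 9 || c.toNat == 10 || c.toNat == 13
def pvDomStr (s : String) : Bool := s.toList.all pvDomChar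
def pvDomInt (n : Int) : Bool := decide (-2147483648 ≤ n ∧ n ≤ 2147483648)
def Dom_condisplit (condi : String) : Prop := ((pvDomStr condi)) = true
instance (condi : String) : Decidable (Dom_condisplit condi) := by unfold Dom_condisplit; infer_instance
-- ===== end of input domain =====

-- B replaces A's index bookkeeping (last delimiter position k + slicing condi[k:i]) with a
-- character-buffer fold that flushes the buffer on each delimiter; same O(n) cost, different algorithm.


-- ===== PORT A =====
-- for i in range(len(condi)): if condi[i] in ['+','|']: append condi[k:i]; k = i
def condisplit (condi : String) : List String :=
  let cs := condi.toList
  let st := (PySem.List.pyRange 0 (cs.length : Int) 1).foldl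
    (fun (st : List String × Int) i =>
      if PySem.List.pyGetD cs i ' ' ∈ ['+', '|'] then
        (st.1 ++ [String.ofList (PySem.List.slice cs (some st.2) (some i))], i)
      else st)
    ([], 0)
  st.1

-- ===== PORT B =====
-- segs = []; cur = []; for c in condi: delimiter → flush ''.join(cur), cur = [c]; else cur.append(c)
def condisplit_alt (condi : String) : List String :=
  (condi.toList.foldl
    (fun (st : List String × List Char) c =>
      if c ∈ ['+', '|'] then (st.1 ++ [String.ofList st.2], [c])
      else (st.1, st.2 ++ [c]))
    ([], [])).1

-- ===== PRECONDITION & SPEC =====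
def Spec_condisplit (condi : String) (out : List String) : Prop := out = condisplit_alt condi
instance (condi : String) (out : List String) : Decidable (Spec_condisplit condi out) := by unfold Spec_condisplit; infer_instance

-- ===== CLAIM (what is proved, stated in full; the proofs are below) =====
def Claim_equal_condisplit : Prop := ∀ (condi : String), Dom_condisplit condi → Spec_condisplit condi (condisplit condi)

-- ===== LEMMAS AND PROOFS =====

-- invariant linking A's (segments, last-delimiter-index k) to B's (segments, buffer):
-- buffer = csf[k:n] where n is the index of the next character to be scanned
theorem pv_fold_inv (csf : List Char) (suf : List Char) :
    ∀ (n k : Nat) (acc : List String), csf.drop n = suf → k ≤ n →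
    ((PySem.List.enumerate suf (n : Int)).foldl
       (fun (st : List String × Int) p =>
         if p.2 ∈ ['+', '|'] then
           (st.1 ++ [String.ofList (PySem.List.slice csf (some st.2) (some p.1))], p.1)
         else st)
       (acc, (k : Int))).1
    = (suf.foldl
       (fun (st : List String × List Char) c =>
         if c ∈ ['+', '|'] then (st.1 ++ [String.ofList st.2], [c])
         else (st.1, st.2 ++ [c]))
       (acc, (csf.drop k).take (n - k))).1 := by
  induction suf with
  | nil => intro n k acc _ _; simp [PySem.List.enumerate]
  | cons c rest ih =>
    intro n k acc hdrop hk
    have hrest : csf.drop (n + 1) = rest := by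
      have h := List.drop_drop (l := csf) (i := 1) (j := n)
      simpa [hdrop] using h.symm
    have hgetn : csf[n]? = some c := by
      have h0 : (csf.drop n)[0]? = some c := by simp [hdrop]
      simpa [List.getElem?_drop] using h0
    rw [PySem.List.enumerate_cons, List.foldl_cons, List.foldl_cons]
    by_cases hc : c ∈ ['+', '|']
    · simp only [hc, if_pos]
      have hslice : PySem.List.slice csf (some (k : Int)) (some (n : Int))
          = (csf.drop k).take (n - k) := PySem.List.slice_natCast csf k n
      have hbuf : (csf.drop n).take 1 = [c] := by rw [hdrop]; rfl
      have hih := ih (n + 1) n (acc ++ [String.ofList ((csf.drop k).take (n - k))]) hrest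
        (Nat.le_succ n)
      rw [hslice]
      simpa [Nat.cast_add, Nat.cast_one, hbuf] using hih
    · simp only [hc, if_neg, not_false_iff]
      have hbuf : (csf.drop k).take (n + 1 - k) = (csf.drop k).take (n - k) ++ [c] := by
        have h1 : n + 1 - k = (n - k) + 1 := by omega
        have h2 : (csf.drop k)[n - k]? = some c := by
          rw [List.getElem?_drop]
          have h3 : k + (n - k) = n := by omega
          rw [h3]; exact hgetn
        rw [h1, List.take_add_one, h2]
        rfl
      have hih := ih (n + 1) k acc hrest (by omega)
      simpa [Nat.cast_add, Nat.cast_one, hbuf] using hih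

-- ===== VERDICT (by name: the statement is the Claim_ definition above) =====
theorem condisplit_spec : Claim_equal_condisplit := by
  intro condi _
  unfold Spec_condisplit condisplit condisplit_alt
  have hfold :
      (PySem.List.pyRange 0 (condi.toList.length : Int) 1).foldl
        (fun (st : List String × Int) i =>
          if PySem.List.pyGetD condi.toList i ' ' ∈ ['+', '|'] then
            (st.1 ++ [String.ofList (PySem.List.slice condi.toList (some st.2) (some i))], i)
          else st)
        ([], 0)
      = (PySem.List.enumerate condi.toList 0).foldl
        (fun (st : List String × Int) p =>
          if p.2 ∈ ['+', '|'] then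
            (st.1 ++ [String.ofList (PySem.List.slice condi.toList (some st.2) (some p.1))], p.1)
          else st)
        ([], 0) := by
    rw [PySem.List.enumerate_eq_map_pyRange condi.toList ' ', List.foldl_map]
    simp [PySem.List.len_eq]
  simp only [hfold]
  have := pv_fold_inv condi.toList condi.toList 0 0 [] (by simp) (le_refl 0)
  simpa using this
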